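-- pv_equiv track=rewrite | github.com/HeadHunter483/msu-ling | Syntax/Ver 2.0/tmp/morphres.py | s_morph
-- ===== SOURCE A (Python) =====
-- def s_morph(string):
--     str5=""
--     mas=[]
--     mas2=[]
--     word = string.split()
--
--     for current_word in word:
--         mas.append(current_word.lower())
--
--     while(len(mas2)!=4):
--         mas2.append("-")
--
--     for s in mas:
--         if (s=='f' or s=='m' or s=='n'): #род
--             mas2[0]=s
--         if (s=='inan' or s=='anim'): #одуш
--             mas2[1]=s
--         if (s=='nom' or s=='gen' or s=='dat' or s=='acc' or s=='ins' or s=='loc'):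
--             mas2[2]=s
--         if (s=='sg' or s=='pl'): #число
--             mas2[3]=s
--
--     i=0
--     for i in range(len(mas2)):
--         str5=str5+' '+mas2[i]
--
--     return str5
-- ===== SOURCE B (Python) =====
-- CATS = [("f", "m", "n"),
--         ("inan", "anim"),
--         ("nom", "gen", "dat", "acc", "ins", "loc"),
--         ("sg", "pl")]
--
-- def s_morph(string):
--     words = [w.lower() for w in string.split()]
--     rev = words[::-1]
--     results = [next((w for w in rev if w in cat), "-") for cat in CATS]
--     return ' ' + ' '.join(results)
-- ===== Notes on version B (the rewrite author's own statement) =====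
-- stated objective: alternative
-- what changed: A makes one token-outer pass mutating four slots with per-token category tests and then a second loop to build the string; B is category-outer: for each of the four category sets it takes the first match in the reversed lowercased word list (last-wins) with a dash default, then space-joins the four results behind a leading space.
import Mathlib
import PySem

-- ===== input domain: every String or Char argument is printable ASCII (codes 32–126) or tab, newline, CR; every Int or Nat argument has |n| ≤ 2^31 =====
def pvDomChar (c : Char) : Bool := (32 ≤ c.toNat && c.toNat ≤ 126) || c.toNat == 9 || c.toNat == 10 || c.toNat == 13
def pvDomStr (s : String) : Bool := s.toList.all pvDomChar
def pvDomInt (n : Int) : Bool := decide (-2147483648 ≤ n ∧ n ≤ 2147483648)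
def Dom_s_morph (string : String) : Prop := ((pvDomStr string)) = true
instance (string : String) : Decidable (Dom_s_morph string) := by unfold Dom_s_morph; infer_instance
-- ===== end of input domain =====

-- B replaces A's token-outer slot-mutation pass by a category-outer reversed-first-match scan; same value everywhere.

-- ===== PORT A =====
-- the four slots mas2[0..3] become a 4-tuple; each 'if' updates its own slot
def s_morph (string : String) : String :=
  let word := PySem.Str.split₀ string
  let mas := word.foldl (fun acc w => acc ++ [PySem.Str.lower w]) []
  let mas2 : String × String × String × String := ("-", "-", "-", "-")
  let mas2 := mas.foldl (fun m s =>
    ((if s == "f" || s == "m" || s == "n" then s else m.1),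
     (if s == "inan" || s == "anim" then s else m.2.1),
     (if s == "nom" || s == "gen" || s == "dat" || s == "acc" || s == "ins" || s == "loc" then s else m.2.2.1),
     (if s == "sg" || s == "pl" then s else m.2.2.2))) mas2
  [mas2.1, mas2.2.1, mas2.2.2.1, mas2.2.2.2].foldl (fun str5 x => str5 ++ " " ++ x) ""

-- ===== PORT B =====
def pvCats : List (List String) :=
  [["f", "m", "n"],
   ["inan", "anim"],
   ["nom", "gen", "dat", "acc", "ins", "loc"],
   ["sg", "pl"]]

def s_morph_alt (string : String) : String :=
  let words := (PySem.Str.split₀ string).map PySem.Str.lower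
  let rev := words.reverse
  let results := pvCats.map (fun cat => (rev.find? (fun w => cat.contains w)).getD "-")
  " " ++ PySem.Str.join " " results

-- ===== PRECONDITION & SPEC =====
def Spec_s_morph (string : String) (out : String) : Prop := out = s_morph_alt string
instance (string : String) (out : String) : Decidable (Spec_s_morph string out) := by unfold Spec_s_morph; infer_instance

-- ===== CLAIM (what is proved, stated in full; the proofs are below) =====
def Claim_equal_s_morph : Prop := ∀ (string : String), Dom_s_morph string → Spec_s_morph string (s_morph string)

-- ===== LEMMAS AND PROOFS =====

-- A's append-accumulating first loop is map
theorem foldl_append_map (l : List String) (acc : List String) :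
    l.foldl (fun a w => a ++ [PySem.Str.lower w]) acc = acc ++ l.map PySem.Str.lower := by
  induction l generalizing acc with
  | nil => simp
  | cons x xs ih => simp [List.foldl, ih]

-- last-wins slot update over the list = first match in the reversed list
theorem foldl_lastwins (p : String → Bool) (l : List String) (d : String) :
    l.foldl (fun acc s => if p s then s else acc) d = (l.reverse.find? p).getD d := by
  induction l generalizing d with
  | nil => simp
  | cons x xs ih =>
      simp only [List.foldl, List.reverse_cons, List.find?_append, ih]
      cases h : xs.reverse.find? p with
      | some y => simp
      | none => simp; split <;> simp_all

-- the product foldl splits into four independent foldls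
theorem foldl_prod4 (p1 p2 p3 p4 : String → Bool) (l : List String)
    (m : String × String × String × String) :
    l.foldl (fun m s =>
      ((if p1 s then s else m.1),
       (if p2 s then s else m.2.1),
       (if p3 s then s else m.2.2.1),
       (if p4 s then s else m.2.2.2))) m =
    (l.foldl (fun a s => if p1 s then s else a) m.1,
     l.foldl (fun a s => if p2 s then s else a) m.2.1,
     l.foldl (fun a s => if p3 s then s else a) m.2.2.1,
     l.foldl (fun a s => if p4 s then s else a) m.2.2.2) := by
  induction l generalizing m with
  | nil => rfl
  | cons x xs ih => simp [List.foldl, ih]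

-- ===== VERDICT (by name: the statement is the Claim_ definition above) =====
theorem s_morph_spec : Claim_equal_s_morph := by
  intro string _
  show s_morph string = s_morph_alt string
  unfold s_morph s_morph_alt pvCats
  simp only [foldl_append_map, List.nil_append, foldl_prod4, foldl_lastwins, List.map_cons,
    List.map_nil, List.foldl]
  have hjoin : ∀ a b c d : String,
      PySem.Str.join " " [a, b, c, d] = a ++ " " ++ b ++ " " ++ c ++ " " ++ d := by
    intro a b c d
    simp only [PySem.Str.join, PySem.Chars.join, List.map_cons, List.map_nil,
      List.intercalate, List.intersperse, List.flatten, List.append_eq, List.append_nil,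
      String.ofList_append, String.ofList_toList]
    simp [String.append_assoc]
  rw [hjoin]
  simp only [List.contains_cons, List.contains_nil, Bool.or_false]
  simp only [Bool.or_assoc]
  simp [String.append_assoc]
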